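-- pv_equiv track=rewrite | github.com/queelius/computational-explorations | src/hypergraph_attacks.py | sunflower_core
-- ===== SOURCE A (Python) =====
-- from typing import Dict, FrozenSet, List, Optional, Set, Tuple
--
-- def is_sunflower(sets: List[FrozenSet[int]]) -> bool:
--     """
--     Check if a collection of sets forms a sunflower.
--
--     A sunflower (or Delta-system) is a family of sets whose pairwise
--     intersections are all identical.  The common part is the "core".
--     """
--     if len(sets) <= 1:
--         return True
--
--     # Core = intersection of all sets.
--     core = sets[0]
--     for s in sets[1:]:
--         core = core & s
--
--     # Check all pairwise intersections equal the core.
--     for i in range(len(sets)):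
--         for j in range(i + 1, len(sets)):
--             if sets[i] & sets[j] != core:
--                 return False
--     return True
--
-- def sunflower_core(sets: List[FrozenSet[int]]) -> Optional[FrozenSet[int]]:
--     """Return the core of a sunflower, or None if not a sunflower."""
--     if not is_sunflower(sets):
--         return None
--     if not sets:
--         return frozenset()
--     core = sets[0]
--     for s in sets[1:]:
--         core = core & s
--     return core
-- ===== SOURCE B (Python) =====
-- from typing import FrozenSet, List, Optional
-- from collections import Counter
--
--
-- def sunflower_core(sets: List[FrozenSet[int]]) -> Optional[FrozenSet[int]]:
--     """Return the core of a sunflower, or None if not a sunflower.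
--
--     Single pass: count in how many sets each element occurs.  For n >= 2
--     sets, the family is a sunflower iff every element occurs in exactly
--     one set or in all n of them; the core is the elements occurring in
--     all n sets.
--     """
--     if not sets:
--         return frozenset()
--     if len(sets) == 1:
--         return frozenset(sets[0])
--     n = len(sets)
--     cnt = Counter(e for s in sets for e in s)
--     if any(1 < c < n for c in cnt.values()):
--         return None
--     return frozenset(e for e, c in cnt.items() if c == n)
-- ===== Notes on version B (the rewrite author's own statement) =====
-- stated objective: alternative
-- what changed: Replaces the all-pairs intersection test (and the separate core fold) by a single frequency count over all elements: a family of n>=2 sets is a sunflower iff every element lies in exactly 1 or in all n of the sets, and the core is the count-n elements.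
import Mathlib
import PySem

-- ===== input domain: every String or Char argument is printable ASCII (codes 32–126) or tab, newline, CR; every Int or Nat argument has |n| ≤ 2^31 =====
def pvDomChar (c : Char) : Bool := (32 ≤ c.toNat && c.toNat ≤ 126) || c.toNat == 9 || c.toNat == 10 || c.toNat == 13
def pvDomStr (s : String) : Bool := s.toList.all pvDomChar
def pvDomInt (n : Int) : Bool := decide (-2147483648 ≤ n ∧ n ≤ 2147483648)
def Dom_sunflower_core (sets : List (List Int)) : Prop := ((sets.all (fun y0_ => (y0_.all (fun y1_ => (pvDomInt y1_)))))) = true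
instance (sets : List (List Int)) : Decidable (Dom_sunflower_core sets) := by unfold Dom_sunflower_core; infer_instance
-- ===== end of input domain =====

-- B replaces the all-pairs intersection test by one frequency count over all elements (objective: alternative).
-- ===== PORT A =====
def is_sunflower (sets : List (List Int)) : Bool :=
  if sets.length ≤ 1 then true
  else
    let core := (sets.drop 1).foldl (fun c s => PySem.Set.inter c s) (sets.headD [])
    (List.range sets.length).all (fun i =>
      (List.range' (i + 1) (sets.length - (i + 1))).all (fun j =>
        PySem.Set.equal (PySem.Set.inter (sets.getD i []) (sets.getD j [])) core))

def sunflower_core (sets : List (List Int)) : Option (List Int) :=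
  if !is_sunflower sets then none
  else if sets.isEmpty then some []
  else some ((sets.drop 1).foldl (fun c s => PySem.Set.inter c s) (sets.headD []))

-- ===== PORT B =====
def sunflower_core_alt (sets : List (List Int)) : Option (List Int) :=
  if sets.length = 0 then some []
  else if sets.length = 1 then some (PySem.Set.ofList (sets.headD []))
  else
    let n : Int := sets.length
    let cnt := PySem.Dict.counter sets.flatten
    if cnt.items.any (fun p => decide (1 < p.2 ∧ p.2 < n)) then none
    else some ((cnt.items.filter (fun p => p.2 == n)).map Prod.fst)

-- ===== PRECONDITION & SPEC =====
-- Pre_: each inner list represents a frozenset, so it holds distinct elements (the type convention for set inputs).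
def Pre_sunflower_core (sets : List (List Int)) : Prop := ∀ s ∈ sets, s.Nodup
instance (sets : List (List Int)) : Decidable (Pre_sunflower_core sets) := by unfold Pre_sunflower_core; infer_instance
def pvWitness_sunflower_core : List (List Int) := [[1, 2], [1, 3], [1, 4]]

def Spec_sunflower_core (sets : List (List Int)) (out : Option (List Int)) : Prop := out = sunflower_core_alt sets
instance (sets : List (List Int)) (out : Option (List Int)) : Decidable (Spec_sunflower_core sets out) := by unfold Spec_sunflower_core; infer_instance

-- ===== CLAIM (what is proved, stated in full; the proofs are below) =====
def Claim_equal_sunflower_core : Prop := ∀ (sets : List (List Int)), Dom_sunflower_core sets → Pre_sunflower_core sets → Spec_sunflower_core sets (sunflower_core sets)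

-- ===== LEMMAS AND PROOFS =====

theorem foldl_inter_eq_filter (l : List (List Int)) (a : List Int) :
    l.foldl (fun c s => PySem.Set.inter c s) a
      = a.filter (fun e => l.all (fun s => PySem.Set.contains s e)) := by
  induction l generalizing a with
  | nil => simp
  | cons s l ih =>
    rw [List.foldl_cons, ih]
    show (PySem.Set.inter a s).filter _ = _
    simp only [PySem.Set.inter, List.filter_filter, List.all_cons]
    exact List.filter_congr (fun x _ => by rw [Bool.and_comm])

theorem count_flatten_eq_countP (sets : List (List Int)) (e : Int)
    (h : ∀ s ∈ sets, s.Nodup) :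
    sets.flatten.count e = sets.countP (fun s => s.contains e) := by
  induction sets with
  | nil => simp
  | cons s l ih =>
    simp only [List.flatten_cons, List.count_append, List.countP_cons]
    rw [ih (fun t ht => h t (List.mem_cons_of_mem _ ht))]
    have hs := h s (List.mem_cons_self)
    by_cases he : e ∈ s
    · rw [List.count_eq_one_of_mem hs he]
      simp [he]; omega
    · rw [List.count_eq_zero.mpr he]
      simp [he]

theorem countP_one_iff (l : List (List Int)) (e : Int) :
    1 ≤ l.countP (fun s => s.contains e) ↔ ∃ k, k < l.length ∧ e ∈ l.getD k [] := by
  rw [show (1 ≤ l.countP (fun s => s.contains e)) ↔ 0 < l.countP (fun s => s.contains e) from Iff.rfl,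
      List.countP_pos_iff]
  constructor
  · rintro ⟨a, ha, hp⟩
    obtain ⟨k, hk, rfl⟩ := List.getElem_of_mem ha
    exact ⟨k, hk, by rw [List.getD_eq_getElem l [] hk]; simpa using hp⟩
  · rintro ⟨k, hk, hm⟩
    refine ⟨l.getD k [], ?_, by simpa using hm⟩
    rw [List.getD_eq_getElem l [] hk]; exact List.getElem_mem hk

theorem countP_two_iff (l : List (List Int)) (e : Int) :
    2 ≤ l.countP (fun s => s.contains e) ↔
      ∃ i j, i < j ∧ j < l.length ∧ e ∈ l.getD i [] ∧ e ∈ l.getD j [] := by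
  induction l with
  | nil => simp
  | cons s l ih =>
    by_cases he : e ∈ s
    · rw [show (s :: l).countP (fun s => s.contains e)
            = l.countP (fun s => s.contains e) + 1 by simp [he]]
      constructor
      · intro h
        obtain ⟨k, hk, hm⟩ := (countP_one_iff l e).mp (by omega)
        exact ⟨0, k+1, by omega, by simpa using hk, by simpa using he, by simpa using hm⟩
      · rintro ⟨i, j, hij, hj, hi, hjm⟩
        rcases j with _ | j
        · omega
        · have : 1 ≤ l.countP (fun s => s.contains e) :=
            (countP_one_iff l e).mpr ⟨j, by simpa using hj, by simpa using hjm⟩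
          omega
    · rw [show (s :: l).countP (fun s => s.contains e)
            = l.countP (fun s => s.contains e) by simp [he], ih]
      constructor
      · rintro ⟨i, j, hij, hj, hi, hjm⟩
        exact ⟨i+1, j+1, by omega, by simpa using hj, by simpa using hi, by simpa using hjm⟩
      · rintro ⟨i, j, hij, hj, hi, hjm⟩
        rcases i with _ | i
        · exact absurd (by simpa using hi) he
        · rcases j with _ | j
          · omega
          · exact ⟨i, j, by omega, by simpa using hj, by simpa using hi, by simpa using hjm⟩

-- occ notation
-- membership in A's core (as filter form) ↔ element occurs in every set
theorem mem_coreA_iff (h : List Int) (t : List (List Int)) (e : Int) :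
    e ∈ h.filter (fun e => t.all (fun s => PySem.Set.contains s e)) ↔
      (h :: t).countP (fun s => s.contains e) = (h :: t).length := by
  rw [List.countP_eq_length]
  simp [List.mem_filter, List.all_eq_true, PySem.Set.contains]

-- the pairwise loop is false iff some element occurs in ≥ 2 but < all sets
theorem is_sunflower_false_iff (s0 s1 : List Int) (rest : List (List Int)) :
    ((List.range (s0 :: s1 :: rest).length).all (fun i =>
       (List.range' (i + 1) ((s0 :: s1 :: rest).length - (i + 1))).all (fun j =>
         PySem.Set.equal
           (PySem.Set.inter ((s0 :: s1 :: rest).getD i []) ((s0 :: s1 :: rest).getD j []))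
           (s0.filter (fun e => (s1 :: rest).all (fun s => PySem.Set.contains s e))))) = false)
    ↔ ∃ e, 2 ≤ (s0 :: s1 :: rest).countP (fun s => s.contains e) ∧
        (s0 :: s1 :: rest).countP (fun s => s.contains e) < (s0 :: s1 :: rest).length := by
  set L := s0 :: s1 :: rest with hL
  set core := s0.filter (fun e => (s1 :: rest).all (fun s => PySem.Set.contains s e)) with hcore
  have hmemL : ∀ i, i < L.length → L.getD i [] ∈ L := fun i h => by
    rw [List.getD_eq_getElem L [] h]; exact List.getElem_mem h
  constructor
  · intro hfalse
    rw [Bool.eq_false_iff] at hfalse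
    simp only [ne_eq, List.all_eq_true, List.mem_range, List.mem_range'_1, not_forall] at hfalse
    obtain ⟨i, hi, j, ⟨hij, hjn⟩, hne⟩ := hfalse
    have hjn' : j < L.length := by omega
    rw [Bool.not_eq_true, Bool.eq_false_iff] at hne
    have hne' : ¬ ∀ x, (x ∈ PySem.Set.inter (L.getD i []) (L.getD j []) ↔ x ∈ core) := by
      intro hall; exact hne ((PySem.Set.equal_iff _ _).mpr hall)
    push Not at hne'
    obtain ⟨e, he⟩ := hne'
    rw [PySem.Set.mem_inter, hcore, mem_coreA_iff, ← hL] at he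
    -- if occ e = L.length then e is in every set, contradiction with ¬iff
    by_cases hocc : L.countP (fun s => s.contains e) = L.length
    · exfalso
      have hall : ∀ s ∈ L, e ∈ s := by
        have := List.countP_eq_length.mp hocc
        intro s hs; simpa using this s hs
      have hmi : e ∈ L.getD i [] := hall _ (hmemL i hi)
      have hmj : e ∈ L.getD j [] := hall _ (hmemL j hjn')
      tauto
    · -- e ∈ both, occ ≠ n
      have hmem : e ∈ L.getD i [] ∧ e ∈ L.getD j [] := by tauto
      refine ⟨e, ?_, ?_⟩
      · exact (countP_two_iff L e).mpr ⟨i, j, by omega, by omega, hmem.1, hmem.2⟩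
      · exact lt_of_le_of_ne List.countP_le_length hocc
  · rintro ⟨e, h2, hlt⟩
    obtain ⟨i, j, hij, hj, hi, hjm⟩ := (countP_two_iff L e).mp h2
    rw [Bool.eq_false_iff]
    simp only [ne_eq, List.all_eq_true, List.mem_range, List.mem_range'_1, not_forall]
    refine ⟨i, by omega, j, ⟨by omega, by omega⟩, ?_⟩
    rw [Bool.not_eq_true, Bool.eq_false_iff]
    intro heq
    have := (PySem.Set.equal_iff _ _).mp heq e
    rw [PySem.Set.mem_inter, hcore, mem_coreA_iff, ← hL] at this
    have : L.countP (fun s => s.contains e) = L.length := this.mp ⟨hi, hjm⟩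
    omega

theorem coreB_eq (s0 s1 : List Int) (rest : List (List Int))
    (pre : ∀ s ∈ s0 :: s1 :: rest, s.Nodup) :
    (((PySem.Dict.counter (s0 :: s1 :: rest).flatten).items.filter
        (fun p => p.2 == ((s0 :: s1 :: rest).length : Int))).map Prod.fst)
      = s0.filter (fun e => (s1 :: rest).all (fun s => PySem.Set.contains s e)) := by
  rw [PySem.Dict.items_counter, List.filter_map, List.map_map]
  have hmapid : (Prod.fst ∘ fun k : Int => (k, ((s0 :: s1 :: rest).flatten.count k : Int)))
      = id := by funext k; rfl
  rw [hmapid, List.map_id]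
  have hflat : (s0 :: s1 :: rest).flatten = s0 ++ (s1 :: rest).flatten := List.flatten_cons ..
  have hcnt : ∀ e : Int, (s0 :: s1 :: rest).flatten.count e
      = (s0 :: s1 :: rest).countP (fun s => s.contains e) :=
    fun e => count_flatten_eq_countP _ e pre
  have hof : PySem.Set.ofList ((s0 :: s1 :: rest).flatten)
      = s0 ++ ((PySem.Set.ofList ((s1 :: rest).flatten)).filter
          (fun y => !(PySem.Set.contains s0 y))) := by
    rw [hflat, PySem.Set.ofList_append,
        PySem.Set.ofList_eq_self_of_nodup s0 (pre s0 List.mem_cons_self),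
        PySem.Set.update_eq_append_filter]
  rw [hof, List.filter_append]
  have hnil : ((PySem.Set.ofList ((s1 :: rest).flatten)).filter
        (fun y => !(PySem.Set.contains s0 y))).filter
        ((fun p : Int × Int => p.2 == ((s0 :: s1 :: rest).length : Int)) ∘
          fun k => (k, ((s0 :: s1 :: rest).flatten.count k : Int))) = [] := by
    rw [List.filter_eq_nil_iff]
    intro a ha
    have hns0 : a ∉ s0 := by
      have := (List.mem_filter.mp ha).2
      simpa [PySem.Set.contains] using this
    simp only [Function.comp, beq_iff_eq, hcnt]
    have h1 : (s0 :: s1 :: rest).countP (fun s => s.contains a)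
        = (s1 :: rest).countP (fun s => s.contains a) := by simp [hns0]
    have h2 : (s1 :: rest).countP (fun s => s.contains a) ≤ (s1 :: rest).length :=
      List.countP_le_length
    simp only [h1]
    intro hc
    have : ((s1 :: rest).countP (fun s => s.contains a) : Int)
        = ((s0 :: s1 :: rest).length : Int) := hc
    have := Int.ofNat.inj this
    have hlen : (s0 :: s1 :: rest).length = (s1 :: rest).length + 1 := rfl
    omega
  rw [hnil, List.append_nil]
  apply List.filter_congr
  intro a ha
  have h1 : (s0 :: s1 :: rest).countP (fun s => s.contains a)
      = (s1 :: rest).countP (fun s => s.contains a) + 1 := by simp [ha]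
  rw [Bool.eq_iff_iff]
  simp only [Function.comp, beq_iff_eq, hcnt, h1, List.all_eq_true]
  constructor
  · intro hc
    have hc' : (s1 :: rest).countP (fun s => s.contains a) + 1
        = (s0 :: s1 :: rest).length := by exact_mod_cast hc
    have : (s1 :: rest).countP (fun s => s.contains a) = (s1 :: rest).length := by
      simp [List.length_cons] at hc' ⊢; omega
    intro s hs
    simpa using List.countP_eq_length.mp this s hs
  · intro hall
    have : (s1 :: rest).countP (fun s => s.contains a) = (s1 :: rest).length :=
      List.countP_eq_length.mpr (fun s hs => by simpa using hall s hs)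
    rw [this]
    simp [List.length_cons]

theorem guardB_iff (s0 s1 : List Int) (rest : List (List Int))
    (pre : ∀ s ∈ s0 :: s1 :: rest, s.Nodup) :
    ((PySem.Dict.counter (s0 :: s1 :: rest).flatten).items.any
        (fun p => decide (1 < p.2 ∧ p.2 < ((s0 :: s1 :: rest).length : Int))) = true)
      ↔ ∃ e, 2 ≤ (s0 :: s1 :: rest).countP (fun s => s.contains e) ∧
          (s0 :: s1 :: rest).countP (fun s => s.contains e) < (s0 :: s1 :: rest).length := by
  have hcnt : ∀ e : Int, (s0 :: s1 :: rest).flatten.count e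
      = (s0 :: s1 :: rest).countP (fun s => s.contains e) :=
    fun e => count_flatten_eq_countP _ e pre
  rw [PySem.Dict.items_counter, List.any_map, List.any_eq_true]
  constructor
  · rintro ⟨k, hk, hp⟩
    simp only [Function.comp, decide_eq_true_eq, hcnt] at hp
    exact ⟨k, by omega, by exact_mod_cast hp.2⟩
  · rintro ⟨e, h2, hlt⟩
    have h1 : 0 < (s0 :: s1 :: rest).countP (fun s => s.contains e) := by omega
    obtain ⟨s, hs, hps⟩ := List.countP_pos_iff.mp h1
    have hef : e ∈ (s0 :: s1 :: rest).flatten :=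
      List.mem_flatten.mpr ⟨s, hs, by simpa using hps⟩
    refine ⟨e, (by simpa [PySem.Set.mem_ofList] using hef), ?_⟩
    simp only [Function.comp, decide_eq_true_eq, hcnt]
    constructor
    · omega
    · exact_mod_cast hlt

theorem sunflower_main (sets : List (List Int)) (pre : ∀ s ∈ sets, s.Nodup) :
    sunflower_core sets = sunflower_core_alt sets := by
  match sets with
  | [] => rfl
  | [s0] =>
    have h0 : s0.Nodup := pre s0 List.mem_cons_self
    simp [sunflower_core, sunflower_core_alt, is_sunflower,
          PySem.Set.ofList_eq_self_of_nodup s0 h0]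
  | s0 :: s1 :: rest =>
    have hlen : ¬ ((s0 :: s1 :: rest).length ≤ 1) := by
      simp only [List.length_cons]; omega
    have hcoreA : ((s0 :: s1 :: rest).drop 1).foldl (fun c s => PySem.Set.inter c s)
          ((s0 :: s1 :: rest).headD [])
        = s0.filter (fun e => (s1 :: rest).all (fun s => PySem.Set.contains s e)) := by
      rw [show (s0 :: s1 :: rest).drop 1 = s1 :: rest from rfl,
          show (s0 :: s1 :: rest).headD [] = s0 from rfl, foldl_inter_eq_filter]
    have hAeq : is_sunflower (s0 :: s1 :: rest)
        = (List.range (s0 :: s1 :: rest).length).all (fun i =>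
            (List.range' (i + 1) ((s0 :: s1 :: rest).length - (i + 1))).all (fun j =>
              PySem.Set.equal
                (PySem.Set.inter ((s0 :: s1 :: rest).getD i []) ((s0 :: s1 :: rest).getD j []))
                (s0.filter (fun e => (s1 :: rest).all (fun s => PySem.Set.contains s e))))) := by
      rw [is_sunflower, if_neg hlen, hcoreA]
    by_cases hbad : ∃ e, 2 ≤ (s0 :: s1 :: rest).countP (fun s => s.contains e) ∧
        (s0 :: s1 :: rest).countP (fun s => s.contains e) < (s0 :: s1 :: rest).length
    · have hA : is_sunflower (s0 :: s1 :: rest) = false := by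
        rw [hAeq]
        exact (is_sunflower_false_iff s0 s1 rest).mpr hbad
      have hB : ((PySem.Dict.counter (s0 :: s1 :: rest).flatten).items.any
          (fun p => decide (1 < p.2 ∧ p.2 < (((s0 :: s1 :: rest).length : Int))))) = true :=
        (guardB_iff s0 s1 rest pre).mpr hbad
      rw [sunflower_core, sunflower_core_alt, hA]
      simp only [hB]
      simp
    · have hA : is_sunflower (s0 :: s1 :: rest) = true := by
        rcases Bool.eq_false_or_eq_true (is_sunflower (s0 :: s1 :: rest)) with ht | hf
        · exact ht
        · exact absurd ((is_sunflower_false_iff s0 s1 rest).mp (hAeq ▸ hf)) hbad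
      have hB : ((PySem.Dict.counter (s0 :: s1 :: rest).flatten).items.any
          (fun p => decide (1 < p.2 ∧ p.2 < (((s0 :: s1 :: rest).length : Int))))) = false := by
        rcases Bool.eq_false_or_eq_true ((PySem.Dict.counter (s0 :: s1 :: rest).flatten).items.any
          (fun p => decide (1 < p.2 ∧ p.2 < (((s0 :: s1 :: rest).length : Int))))) with ht | hf
        · exact absurd ((guardB_iff s0 s1 rest pre).mp ht) hbad
        · exact hf
      rw [sunflower_core, sunflower_core_alt, hA]
      simp only [hB]
      rw [hcoreA, coreB_eq s0 s1 rest pre]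
      simp

-- ===== VERDICT (by name: the statement is the Claim_ definition above) =====
theorem sunflower_core_spec : Claim_equal_sunflower_core := by
  intro sets _dom pre
  unfold Spec_sunflower_core
  unfold Pre_sunflower_core at pre
  exact sunflower_main sets pre
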